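-- pv_equiv track=rewrite | github.com/pypi-data/pypi-mirror-401 | packages/rslearn/rslearn-0.0.21.tar.gz/rslearn-0.0.21/rslearn/train/callbacks/freeze_unfreeze.py | _names_matching
-- ===== SOURCE A (Python) =====
-- from collections.abc import Iterable, Sequence
--
-- def _names_matching(names: Iterable[str], selectors: Sequence[str]) -> set[str]:
--     """Return the subset of `names` that contains any of the given selectors.
--
--     Matching is done via simple substring checks (`sel in name`).
--
--     Args:
--         names: Iterable of qualified module names (e.g., from `named_modules()`).
--         selectors: Substrings to match against each name. Empty strings are ignored.
--
--     Returns: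
--         A set of names from `names` that match at least one selector.
--     """
--     if not selectors:
--         return set()
--     sels: list[str] = [s for s in selectors if s]
--     out: set[str] = set()
--     for n in names:
--         if any(sel in n for sel in sels):
--             out.add(n)
--     return out
-- ===== SOURCE B (Python) =====
-- def _hit(name, sels, maxlen):
--     # does any window name[i:j] (1 <= j-i <= maxlen) equal a selector?
--     L = len(name)
--     for i in range(L):
--         for j in range(i + 1, min(i + maxlen, L) + 1):
--             if name[i:j] in sels:
--                 return True
--     return False
--
--
-- def _names_matching(names, selectors):
--     sels = set(s for s in selectors if s)
--     if not sels:
--         return set()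
--     maxlen = max(map(len, sels))
--     return set(n for n in names if _hit(n, sels, maxlen))
-- ===== Notes on version B (the rewrite author's own statement) =====
-- stated objective: faster
-- what changed: B builds a hash set of the (non-empty, deduplicated) selectors plus their maximum length once, then tests each name's substrings of length up to that maximum against the set, instead of A's separate `sel in name` substring scan for every selector.
import Mathlib
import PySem

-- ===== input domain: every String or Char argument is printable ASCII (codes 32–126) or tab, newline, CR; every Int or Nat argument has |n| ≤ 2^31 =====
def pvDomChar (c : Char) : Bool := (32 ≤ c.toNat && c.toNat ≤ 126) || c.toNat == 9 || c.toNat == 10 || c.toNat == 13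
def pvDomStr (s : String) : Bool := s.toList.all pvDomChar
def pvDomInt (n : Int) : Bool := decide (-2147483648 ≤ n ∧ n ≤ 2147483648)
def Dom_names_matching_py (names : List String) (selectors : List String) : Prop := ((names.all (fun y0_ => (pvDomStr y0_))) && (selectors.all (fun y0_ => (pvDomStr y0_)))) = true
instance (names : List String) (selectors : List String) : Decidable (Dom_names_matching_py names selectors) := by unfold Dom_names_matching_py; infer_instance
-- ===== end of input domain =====

-- B hashes the selectors into a set once and tests each name's bounded-length windows against
-- that set, instead of A's per-selector `sel in n` scans (faster when there are many selectors).

-- ===== PORT A =====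
-- A: if not selectors: return set(); sels = [s for s in selectors if s];
--    out = set(); for n in names: if any(sel in n for sel in sels): out.add(n); return out
def names_matching_py (names : List String) (selectors : List String) : List String :=
  if selectors.isEmpty then PySem.Set.empty
  else
    let sels := selectors.filter (fun s => !s.toList.isEmpty)
    names.foldl
      (fun out n => if sels.any (fun sel => PySem.Str.isIn sel n) then PySem.Set.add out n else out)
      PySem.Set.empty

-- ===== PORT B =====
-- B helper _hit: L = len(name); for i in range(L): for j in range(i+1, min(i+maxlen, L)+1):
--   if name[i:j] in sels: return True; return False
-- (range(i+1, min(i+maxlen, L)+1) over Nats is List.range' (i+1) (min (i+maxlen) L - i))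
def pvHit (n : String) (sels : PySem.Set String) (maxlen : Nat) : Bool :=
  let L := n.toList.length
  (List.range L).any (fun i =>
    (List.range' (i + 1) (min (i + maxlen) L - i)).any (fun j =>
      PySem.Set.contains sels (PySem.Str.slice n (some (i : Int)) (some (j : Int)))))

-- B: sels = set(s for s in selectors if s); if not sels: return set();
--    maxlen = max(map(len, sels)); return set(n for n in names if _hit(n, sels, maxlen))
-- (max of a nonempty list of Nat lengths is its foldl max 0)
def names_matching_py_alt (names : List String) (selectors : List String) : List String :=
  let sels : PySem.Set String := PySem.Set.ofList (selectors.filter (fun s => !s.toList.isEmpty))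
  if sels.isEmpty then PySem.Set.empty
  else
    let maxlen := (sels.map (fun s => s.toList.length)).foldl max 0
    PySem.Set.ofList (names.filter (fun n => pvHit n sels maxlen))

-- ===== PRECONDITION & SPEC =====
def Spec_names_matching_py (names : List String) (selectors : List String) (out : List String) : Prop := out = names_matching_py_alt names selectors
instance (names : List String) (selectors : List String) (out : List String) : Decidable (Spec_names_matching_py names selectors out) := by unfold Spec_names_matching_py; infer_instance

-- ===== CLAIM (what is proved, stated in full; the proofs are below) =====
def Claim_equal_names_matching_py : Prop := ∀ (names : List String) (selectors : List String), Dom_names_matching_py names selectors → Spec_names_matching_py names selectors (names_matching_py names selectors)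

-- ===== LEMMAS AND PROOFS =====

-- A's guarded-add fold over `names` equals folding Set.add over the filtered list.
theorem foldl_add_filter {p : String → Bool} (names : List String) (acc : List String) :
    names.foldl (fun out n => if p n then PySem.Set.add out n else out) acc
      = (names.filter p).foldl PySem.Set.add acc := by
  induction names generalizing acc with
  | nil => rfl
  | cons n ns ih =>
    by_cases h : p n = true <;> simp [h, List.foldl_cons, ih]

-- pointwise: B's window scan hits the selector set iff some selector of F is a substring
-- (F has no empty string; M bounds every selector's length).
theorem pvHit_eq_any_isIn (n : String) (F : List String)
    (hne : ∀ s ∈ F, s.toList ≠ [])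
    (M : Nat) (hM : ∀ s ∈ F, s.toList.length ≤ M) :
    pvHit n (PySem.Set.ofList F) M = F.any (fun sel => PySem.Str.isIn sel n) := by
  rw [Bool.eq_iff_iff]
  simp only [pvHit, List.any_eq_true, List.mem_range, List.mem_range'_1,
    PySem.Set.contains_iff, PySem.Set.mem_ofList]
  constructor
  · rintro ⟨i, hi, j, ⟨hj1, hj2⟩, hmem⟩
    refine ⟨_, hmem, ?_⟩
    rw [PySem.Str.isIn_iff_infix, PySem.Str.toList_slice,
      PySem.Chars.slice_eq_listSlice, PySem.List.slice_natCast]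
    have hpre : (n.toList.drop i).take (j - i) <+: n.toList.drop i := List.take_prefix _ _
    exact hpre.isInfix.trans (List.drop_suffix i n.toList).isInfix
  · rintro ⟨s, hs, hin⟩
    rw [PySem.Str.isIn_iff_infix] at hin
    obtain ⟨u, v, huv⟩ := hin
    have hlen : u.length + s.toList.length + v.length = n.toList.length := by
      rw [← huv]; simp; omega
    have hpos : 0 < s.toList.length := List.length_pos_iff.mpr (hne s hs)
    have hle : s.toList.length ≤ M := hM s hs
    have hminj : u.length + s.toList.length ≤ min (u.length + M) n.toList.length :=
      le_min (by omega) (by omega)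
    refine ⟨u.length, by omega, u.length + s.toList.length, ⟨by omega, by omega⟩, ?_⟩
    have hsl : PySem.Str.slice n (some (u.length : Int))
        (some ((u.length + s.toList.length : Nat) : Int)) = s := by
      apply String.toList_inj.mp
      rw [PySem.Str.toList_slice, PySem.Chars.slice_eq_listSlice, PySem.List.slice_natCast,
        ← huv]
      simp [List.drop_left', List.take_left']
    rw [hsl]
    exact hs

-- ===== VERDICT (by name: the statement is the Claim_ definition above) =====
theorem names_matching_py_spec : Claim_equal_names_matching_py := by
  intro names selectors _
  unfold Spec_names_matching_py names_matching_py names_matching_py_alt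
  set F := selectors.filter (fun s => !s.toList.isEmpty) with hF
  have hne : ∀ s ∈ F, s.toList ≠ [] := by
    intro s hs
    have := List.of_mem_filter hs
    simpa [List.isEmpty_iff] using this
  by_cases hsel0 : selectors.isEmpty
  · have : F = [] := by rw [hF, List.isEmpty_iff.mp hsel0]; rfl
    simp [hsel0, this]
  · simp only [hsel0]
    rw [foldl_add_filter]
    by_cases hFnil : F = []
    · simp [hFnil, PySem.Set.empty]
    · have hset : (PySem.Set.ofList F).isEmpty = false := by
        obtain ⟨s, ss, hcons⟩ := List.exists_cons_of_ne_nil hFnil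
        have hmem : s ∈ PySem.Set.ofList F := (PySem.Set.mem_ofList _ _).mpr (by rw [hcons]; simp)
        rw [List.isEmpty_eq_false_iff]
        intro h; rw [h] at hmem; simp at hmem
      simp only [hset]
      have hM : ∀ s ∈ F, s.toList.length ≤ ((PySem.Set.ofList F).map (fun s => s.toList.length)).foldl max 0 := by
        intro s hs
        exact (PySem.List.le_foldl_max _ _).2 _
          (List.mem_map_of_mem ((PySem.Set.mem_ofList _ _).mpr hs))
      have hfil : names.filter (fun n => F.any (fun sel => PySem.Str.isIn sel n))
          = names.filter (fun n => pvHit n (PySem.Set.ofList F) (((PySem.Set.ofList F).map (fun s => s.toList.length)).foldl max 0)) :=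
        List.filter_congr (fun n _ => (pvHit_eq_any_isIn n F hne _ hM).symm)
      rw [hfil, PySem.Set.ofList_eq_foldl]
      rfl
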